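-- pv_equiv track=rewrite | github.com/645359132/mc_tools | ani/ani_tool8.py | remove_bones_animation
-- ===== SOURCE A (Python) =====
-- def remove_bones_animation(animation_data, bones_to_remove):
--     """从动画中移除指定的骨骼"""
--     if 'animations' in animation_data:
--         for animation_name, animation in animation_data['animations'].items():
--             if 'bones' in animation:
--                 for bone in bones_to_remove:
--                     if bone in animation['bones']:
--                         del animation['bones'][bone]
--     return animation_data
-- ===== SOURCE B (Python) =====
-- def remove_bones_animation(animation_data, bones_to_remove):
--     """从动画中移除指定的骨骼"""
--     remove = set(bones_to_remove)
--
--     def clean(animation):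
--         if 'bones' not in animation:
--             return animation
--         return {key: ({b: t for b, t in val.items() if b not in remove}
--                       if key == 'bones' else val)
--                 for key, val in animation.items()}
--
--     if 'animations' in animation_data:
--         animation_data['animations'] = {
--             name: clean(anim)
--             for name, anim in animation_data['animations'].items()}
--     return animation_data
-- ===== Notes on version B (the rewrite author's own statement) =====
-- stated objective: idiomatic
-- what changed: A loops over bones_to_remove deleting keys in place from each bones dict; B builds a membership set once and rebuilds the whole animations mapping with nested dict comprehensions, rebuilding each animation and filtering its bones dict in a single pass per dict.
import Mathlib
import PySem

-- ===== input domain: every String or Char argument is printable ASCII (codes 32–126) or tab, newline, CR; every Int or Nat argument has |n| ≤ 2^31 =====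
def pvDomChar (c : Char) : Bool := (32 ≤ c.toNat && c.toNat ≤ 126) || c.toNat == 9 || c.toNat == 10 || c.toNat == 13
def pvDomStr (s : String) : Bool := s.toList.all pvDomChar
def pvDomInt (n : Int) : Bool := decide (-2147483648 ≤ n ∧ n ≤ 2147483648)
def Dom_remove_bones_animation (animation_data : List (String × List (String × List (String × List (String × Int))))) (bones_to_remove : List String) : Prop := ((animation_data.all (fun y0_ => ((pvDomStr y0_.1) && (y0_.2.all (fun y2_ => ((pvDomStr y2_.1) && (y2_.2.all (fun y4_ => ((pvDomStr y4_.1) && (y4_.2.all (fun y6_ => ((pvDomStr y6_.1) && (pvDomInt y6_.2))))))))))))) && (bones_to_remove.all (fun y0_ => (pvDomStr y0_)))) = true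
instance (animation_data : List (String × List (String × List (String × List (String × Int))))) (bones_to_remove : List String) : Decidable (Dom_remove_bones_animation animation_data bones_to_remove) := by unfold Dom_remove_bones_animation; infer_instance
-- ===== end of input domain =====

-- B builds one membership set and rebuilds the animations mapping with nested comprehensions
-- instead of A's delete-per-bone in-place loop (idiomatic rewrite). A mutates the nested dicts in
-- place; the equivalence proved is about the returned value.

-- ===== PORT A =====
-- updating the value stored at the FIRST occurrence of a key models Python's in-place
-- mutation of an existing dict entry (insertion position is kept)
def pvUpdateFirst {α : Type} (key : String) (f : α → α) : List (String × α) → List (String × α)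
  | [] => []
  | (k, v) :: rest => if k == key then (k, f v) :: rest else (k, v) :: pvUpdateFirst key f rest

-- 'for bone in bones_to_remove: if bone in bones: del bones[bone]'
def pvDelLoop (bs : List (String × Int)) (bones_to_remove : List String) : List (String × Int) :=
  bones_to_remove.foldl
    (fun bs bone =>
      if bs.any (fun kv => kv.1 == bone) then bs.eraseP (fun kv => kv.1 == bone) else bs)
    bs

def remove_bones_animation (animation_data : List (String × List (String × List (String × List (String × Int))))) (bones_to_remove : List String) : List (String × List (String × List (String × List (String × Int)))) :=
  if animation_data.any (fun kv => kv.1 == "animations") then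
    pvUpdateFirst "animations"
      (fun anims =>
        anims.map (fun na =>
          (na.1,
            if na.2.any (fun kv => kv.1 == "bones") then
              pvUpdateFirst "bones" (fun bs => pvDelLoop bs bones_to_remove) na.2
            else na.2)))
      animation_data
  else animation_data

-- ===== PORT B =====
-- "{b: t for b, t in val.items() if b not in remove}"
def altFilterBones (remove : PySem.Set String) : List (String × Int) → List (String × Int)
  | [] => []
  | (b, t) :: rest =>
      if PySem.Set.contains remove b then altFilterBones remove rest
      else (b, t) :: altFilterBones remove rest

-- "def clean(animation): …" — rebuild the animation dict, filtering the 'bones' entry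
def altClean (remove : PySem.Set String) (animation : List (String × List (String × Int))) : List (String × List (String × Int)) :=
  if animation.any (fun kv => kv.1 == "bones") = false then animation
  else animation.map (fun kv =>
    (kv.1, if kv.1 == "bones" then altFilterBones remove kv.2 else kv.2))

-- "animation_data['animations'] = {name: clean(anim) …}" — in-place overwrite of the entry
def altSetAnimations (remove : PySem.Set String) : List (String × List (String × List (String × List (String × Int)))) → List (String × List (String × List (String × List (String × Int))))
  | [] => []
  | (key, val) :: rest =>
      if key == "animations" then
        (key, val.map (fun na => (na.1, altClean remove na.2))) :: rest
      else (key, val) :: altSetAnimations remove rest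

def remove_bones_animation_alt (animation_data : List (String × List (String × List (String × List (String × Int))))) (bones_to_remove : List String) : List (String × List (String × List (String × List (String × Int)))) :=
  let remove : PySem.Set String := PySem.Set.ofList bones_to_remove
  if animation_data.any (fun kv => kv.1 == "animations") then
    altSetAnimations remove animation_data
  else animation_data

-- decidable equality of the nested result type, built explicitly (automatic synthesis
-- exceeds the default instance-search size at this nesting depth)
def pvDec1 : DecidableEq (List (String × Int)) := fun a b => @instDecidableEqList _ instDecidableEqProd a b
def pvDec2 : DecidableEq (List (String × List (String × Int))) := fun a b => @instDecidableEqList _ (@instDecidableEqProd _ _ _ pvDec1) a b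
def pvDec3 : DecidableEq (List (String × List (String × List (String × Int)))) := fun a b => @instDecidableEqList _ (@instDecidableEqProd _ _ _ pvDec2) a b
def pvDec4 : DecidableEq (List (String × List (String × List (String × List (String × Int))))) := fun a b => @instDecidableEqList _ (@instDecidableEqProd _ _ _ pvDec3) a b

-- ===== PRECONDITION & SPEC =====
-- Pre_ excludes association lists whose animation-level or bones-level dicts carry duplicate
-- keys: a Python dict cannot hold duplicate keys, so no Python input corresponds to such a
-- list and the equivalence is claimed only on lists that encode actual dicts.
def Pre_remove_bones_animation (animation_data : List (String × List (String × List (String × List (String × Int))))) (bones_to_remove : List String) : Prop :=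
  ∀ p ∈ animation_data, ∀ q ∈ p.2,
    (q.2.map Prod.fst).Nodup ∧ ∀ r ∈ q.2, (r.2.map Prod.fst).Nodup

instance (animation_data : List (String × List (String × List (String × List (String × Int))))) (bones_to_remove : List String) : Decidable (Pre_remove_bones_animation animation_data bones_to_remove) := by unfold Pre_remove_bones_animation; infer_instance

def pvWitness_remove_bones_animation : (List (String × List (String × List (String × List (String × Int))))) × List String :=
  ([("animations", [("walk", [("bones", [("arm", 1), ("leg", 2)])])])], ["arm"])

def Spec_remove_bones_animation (animation_data : List (String × List (String × List (String × List (String × Int))))) (bones_to_remove : List String) (out : List (String × List (String × List (String × List (String × Int))))) : Prop := out = remove_bones_animation_alt animation_data bones_to_remove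
instance (animation_data : List (String × List (String × List (String × List (String × Int))))) (bones_to_remove : List String) (out : List (String × List (String × List (String × List (String × Int))))) : Decidable (Spec_remove_bones_animation animation_data bones_to_remove out) := by unfold Spec_remove_bones_animation; exact pvDec4 out _

-- ===== CLAIM (what is proved, stated in full; the proofs are below) =====
def Claim_equal_remove_bones_animation : Prop := ∀ (animation_data : List (String × List (String × List (String × List (String × Int))))) (bones_to_remove : List String), Dom_remove_bones_animation animation_data bones_to_remove → Pre_remove_bones_animation animation_data bones_to_remove → Spec_remove_bones_animation animation_data bones_to_remove (remove_bones_animation animation_data bones_to_remove)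

-- ===== LEMMAS AND PROOFS =====

-- deleting one key from a duplicate-free bones dict is the same as filtering it out
theorem eraseP_eq_filter_of_nodup (bs : List (String × Int)) (b : String)
    (h : (bs.map Prod.fst).Nodup) :
    bs.eraseP (fun kv => kv.1 == b) = bs.filter (fun kv => !(kv.1 == b)) := by
  induction bs with
  | nil => rfl
  | cons kv rest ih =>
    simp only [List.map_cons, List.nodup_cons] at h
    by_cases hk : kv.1 == b
    · have hkb : kv.1 = b := by simpa using hk
      have : rest.filter (fun kv => !(kv.1 == b)) = rest := by
        apply List.filter_eq_self.mpr
        intro x hx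
        have hxk : x.1 ≠ kv.1 := by
          intro e
          exact h.1 (e ▸ List.mem_map_of_mem hx)
        rw [hkb] at hxk
        simpa using hxk
      simp [hk, this]
    · simp [hk, ih h.2]

-- one step of A's loop on a duplicate-free bones dict
theorem step_eq_filter (bs : List (String × Int)) (b : String)
    (h : (bs.map Prod.fst).Nodup) :
    (if bs.any (fun kv => kv.1 == b) then bs.eraseP (fun kv => kv.1 == b) else bs)
      = bs.filter (fun kv => !(kv.1 == b)) := by
  by_cases ha : bs.any (fun kv => kv.1 == b)
  · simp [ha, eraseP_eq_filter_of_nodup bs b h]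
  · have : bs.filter (fun kv => !(kv.1 == b)) = bs := by
      apply List.filter_eq_self.mpr
      intro x hx
      simp only [List.any_eq_true, not_exists, not_and] at ha
      have := ha x hx
      simpa using this
    simp [ha, this]

theorem nodup_keys_filter (bs : List (String × Int)) (p : String × Int → Bool)
    (h : (bs.map Prod.fst).Nodup) : ((bs.filter p).map Prod.fst).Nodup :=
  ((List.filter_sublist).map Prod.fst).nodup h

-- A's whole deletion loop on a duplicate-free bones dict is one filter by list membership
theorem delLoop_eq_filter (l : List String) (bs : List (String × Int))
    (h : (bs.map Prod.fst).Nodup) :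
    pvDelLoop bs l = bs.filter (fun kv => !(l.contains kv.1)) := by
  induction l generalizing bs with
  | nil => simp [pvDelLoop]
  | cons b l ih =>
    have hstep := step_eq_filter bs b h
    have hn := nodup_keys_filter bs (fun kv => !(kv.1 == b)) h
    calc pvDelLoop bs (b :: l)
        = pvDelLoop (if bs.any (fun kv => kv.1 == b) then bs.eraseP (fun kv => kv.1 == b) else bs) l := by
          simp [pvDelLoop, List.foldl_cons]
      _ = pvDelLoop (bs.filter (fun kv => !(kv.1 == b))) l := by rw [hstep]
      _ = (bs.filter (fun kv => !(kv.1 == b))).filter (fun kv => !(l.contains kv.1)) := ih _ hn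
      _ = bs.filter (fun kv => !((b :: l).contains kv.1)) := by
          rw [List.filter_filter]
          apply List.filter_congr
          intro x _
          simp only [List.contains_cons, Bool.not_or, Bool.and_comm]

-- B's bones comprehension, written with the membership set, equals the same list-membership filter
theorem altFilterBones_eq (l : List String) (bs : List (String × Int)) :
    altFilterBones (PySem.Set.ofList l) bs = bs.filter (fun kv => !(l.contains kv.1)) := by
  induction bs with
  | nil => rfl
  | cons kv rest ih =>
    by_cases hm : kv.1 ∈ l
    · simp [altFilterBones, PySem.Set.contains, hm, ih]
    · simp [altFilterBones, PySem.Set.contains, hm, ih]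

-- pvUpdateFirst at a key whose other occurrences are excluded by Nodup equals a map that
-- rewrites only matching keys
theorem updateFirst_eq_map {α : Type} (key : String) (f : α → α)
    (xs : List (String × α)) (h : (xs.map Prod.fst).Nodup) :
    pvUpdateFirst key f xs
      = xs.map (fun kv => if kv.1 == key then (kv.1, f kv.2) else kv) := by
  induction xs with
  | nil => rfl
  | cons kv rest ih =>
    obtain ⟨k, v⟩ := kv
    simp only [List.map_cons, List.nodup_cons] at h
    by_cases hk : k == key
    · have hkey : k = key := by simpa using hk
      have hrest : rest.map (fun kv => if kv.1 == key then (kv.1, f kv.2) else kv) = rest := by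
        conv_rhs => rw [← List.map_id rest]
        apply List.map_congr_left
        intro x hx
        have hxk : (x.1 == key) = false := by
          have : x.1 ≠ k := fun e => h.1 (e ▸ List.mem_map_of_mem hx)
          rw [hkey] at this
          simpa using this
        simp [hxk]
      simp only [pvUpdateFirst, List.map_cons, if_pos hk, hrest]
    · simp only [pvUpdateFirst, List.map_cons, if_neg hk, ih h.2]

-- pvUpdateFirst only looks at the value stored under the key
theorem pvUpdateFirst_congr {α : Type} (key : String) (f g : α → α)
    (xs : List (String × α)) (h : ∀ p ∈ xs, f p.2 = g p.2) :
    pvUpdateFirst key f xs = pvUpdateFirst key g xs := by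
  induction xs with
  | nil => rfl
  | cons kv rest ih =>
    simp only [pvUpdateFirst]
    by_cases hk : kv.1 == key
    · simp [hk, h kv (by simp)]
    · simp [hk, ih (fun p hp => h p (by simp [hp]))]

-- B's overwrite of the 'animations' entry is pvUpdateFirst with the comprehension as value
theorem altSetAnimations_eq_updateFirst (remove : PySem.Set String)
    (xs : List (String × List (String × List (String × List (String × Int))))) :
    altSetAnimations remove xs
      = pvUpdateFirst "animations"
          (fun anims => anims.map (fun na => (na.1, altClean remove na.2))) xs := by
  induction xs with
  | nil => rfl
  | cons kv rest ih =>
    obtain ⟨k, v⟩ := kv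
    by_cases hk : k == "animations"
    · simp [altSetAnimations, pvUpdateFirst, hk]
    · simp [altSetAnimations, pvUpdateFirst, hk, ih]

-- A's per-animation update of the bones dict equals B's clean on duplicate-free dicts
theorem perAnimation_eq (btr : List String)
    (anim : List (String × List (String × Int)))
    (hkeys : (anim.map Prod.fst).Nodup)
    (hbones : ∀ r ∈ anim, (r.2.map Prod.fst).Nodup) :
    (if anim.any (fun kv => kv.1 == "bones") then
        pvUpdateFirst "bones" (fun bs => pvDelLoop bs btr) anim
      else anim)
      = altClean (PySem.Set.ofList btr) anim := by
  unfold altClean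
  by_cases hb : anim.any (fun kv => kv.1 == "bones")
  · rw [if_pos hb, if_neg (by simp [hb]),
      updateFirst_eq_map "bones" (fun bs => pvDelLoop bs btr) anim hkeys]
    apply List.map_congr_left
    intro kv hkv
    by_cases hk : kv.1 == "bones"
    · rw [if_pos hk, if_pos hk,
        delLoop_eq_filter btr kv.2 (hbones kv hkv), altFilterBones_eq btr kv.2]
    · simp [hk]
  · rw [if_neg hb, if_pos (Bool.eq_false_iff.mpr hb)]

-- ===== VERDICT (by name: the statement is the Claim_ definition above) =====
theorem remove_bones_animation_spec : Claim_equal_remove_bones_animation := by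
  intro ad btr _hDom hPre
  unfold Spec_remove_bones_animation remove_bones_animation remove_bones_animation_alt
  by_cases hA : ad.any (fun kv => kv.1 == "animations")
  · rw [if_pos hA, if_pos hA, altSetAnimations_eq_updateFirst]
    apply pvUpdateFirst_congr
    intro p hp
    apply List.map_congr_left
    intro na hna
    apply congrArg (Prod.mk na.1)
    exact perAnimation_eq btr na.2 (hPre p hp na hna).1 (hPre p hp na hna).2
  · rw [if_neg hA, if_neg hA]
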